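-- pv_equiv track=rewrite | github.com/kushalthaman/tex-to-tb-xls | syllabary_finnish.py | eval_coda
-- ===== SOURCE A (Python) =====
-- def eval_coda(template):
--     count = 0
--     for char in template[::-1]:
--         if char == 'C':
--             count += 1
--         else:
--             break
--
--     return count > 1
-- ===== SOURCE B (Python) =====
-- def eval_coda(template):
--     return len(template) >= 2 and template[-1] == 'C' and template[-2] == 'C'
-- ===== Notes on version B (the rewrite author's own statement) =====
-- stated objective: simpler
-- what changed: Replaces the reversed-scan counting loop with a direct closed-form check that the last two characters are both 'C'.
import Mathlib
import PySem

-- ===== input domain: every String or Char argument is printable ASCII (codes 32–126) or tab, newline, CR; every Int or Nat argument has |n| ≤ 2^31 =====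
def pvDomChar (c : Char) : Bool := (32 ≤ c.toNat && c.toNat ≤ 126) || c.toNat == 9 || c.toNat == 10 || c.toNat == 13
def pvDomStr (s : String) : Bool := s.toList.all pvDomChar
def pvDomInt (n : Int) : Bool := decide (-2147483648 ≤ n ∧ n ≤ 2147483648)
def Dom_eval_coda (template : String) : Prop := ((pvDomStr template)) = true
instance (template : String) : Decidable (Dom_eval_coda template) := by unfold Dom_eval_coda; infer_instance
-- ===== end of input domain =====

-- B replaces A's reversed-scan counting loop with a closed-form check of the last two characters (simpler).


-- ===== PORT A =====
-- A's loop over template[::-1] with break: count the leading 'C's of the reversed char list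
def evalCodaLoop : List Char → Nat
  | [] => 0
  | c :: rest => if c == 'C' then evalCodaLoop rest + 1 else 0

def eval_coda (template : String) : Bool :=
  decide (1 < evalCodaLoop template.toList.reverse)

-- ===== PORT B =====
-- B: len(template) >= 2 and template[-1] == 'C' and template[-2] == 'C'
def eval_coda_alt (template : String) : Bool :=
  decide (2 ≤ PySem.Str.len template) &&
    (PySem.Str.pyGet? template (-1) == some 'C') &&
    (PySem.Str.pyGet? template (-2) == some 'C')

-- ===== PRECONDITION & SPEC =====
def Spec_eval_coda (template : String) (out : Bool) : Prop := out = eval_coda_alt template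
instance (template : String) (out : Bool) : Decidable (Spec_eval_coda template out) := by unfold Spec_eval_coda; infer_instance

-- ===== CLAIM (what is proved, stated in full; the proofs are below) =====
def Claim_equal_eval_coda : Prop := ∀ (template : String), Dom_eval_coda template → Spec_eval_coda template (eval_coda template)

-- ===== LEMMAS AND PROOFS =====
-- Python's negative index xs[-k] read off the reversed list
theorem pyGet_neg_eq_reverse_get (l : List Char) (k : Nat) (hk : 0 < k) :
    PySem.List.pyGet? l (-(k:Int)) = l.reverse[k-1]? := by
  by_cases h : k ≤ l.length
  · rw [PySem.List.pyGet?_neg_natCast l k hk h, List.getElem?_reverse (by omega)]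
    congr 1
    omega
  · rw [(PySem.List.pyGet?_eq_none_iff _ _).2, List.getElem?_eq_none (by simp; omega)]
    simp [PySem.Raise.InRange]
    omega

theorem evalCoda_eq_alt (template : String) : eval_coda template = eval_coda_alt template := by
  unfold eval_coda eval_coda_alt
  have h1 : PySem.Str.pyGet? template (-1) = template.toList.reverse[0]? := by
    rw [show (-1 : Int) = -((1:Nat):Int) by norm_num]
    simpa [PySem.Str.pyGet?] using pyGet_neg_eq_reverse_get template.toList 1 (by omega)
  have h2 : PySem.Str.pyGet? template (-2) = template.toList.reverse[1]? := by
    rw [show (-2 : Int) = -((2:Nat):Int) by norm_num]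
    simpa [PySem.Str.pyGet?] using pyGet_neg_eq_reverse_get template.toList 2 (by omega)
  rw [h1, h2, PySem.Str.len_eq,
      show template.toList.length = template.toList.reverse.length by simp]
  generalize template.toList.reverse = r
  match r with
  | [] => simp [evalCodaLoop]
  | [c] => by_cases hc : c == 'C' <;> simp [evalCodaLoop, hc]
  | c1 :: c2 :: rest =>
    simp only [evalCodaLoop]
    by_cases hc1 : c1 == 'C' <;> by_cases hc2 : c2 == 'C' <;>
      simp_all <;> omega

-- ===== VERDICT (by name: the statement is the Claim_ definition above) =====
theorem eval_coda_spec : Claim_equal_eval_coda := by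
  intro t _
  unfold Spec_eval_coda
  exact evalCoda_eq_alt t
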